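-- pv_equiv track=rewrite | github.com/marcus-aca/local-agentic-delivery-loop | main.py | has_repeating_sequence
-- ===== SOURCE A (Python) =====
-- def has_repeating_sequence(items: list[str], window: int, repeats: int) -> bool:
--     if window <= 0 or repeats <= 1:
--         return False
--     needed = window * repeats
--     if len(items) < needed:
--         return False
--     block = items[-window:]
--     for idx in range(2, repeats + 1):
--         start = -window * idx
--         end = -window * (idx - 1)
--         if items[start:end] != block:
--             return False
--     return True
-- ===== SOURCE B (Python) =====
-- def has_repeating_sequence(items: list[str], window: int, repeats: int) -> bool:
--     if window <= 0 or repeats <= 1: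
--         return False
--     needed = window * repeats
--     if len(items) < needed:
--         return False
--     block = items[-window:]
--     tail = items[-needed:]
--     return tail == block * repeats
-- ===== Notes on version B (the rewrite author's own statement) =====
-- stated objective: simpler
-- what changed: Replaces A's indexed loop of per-block negative-slice comparisons (with early exit) by building the expected tail once as block * repeats and doing a single list equality.
import Mathlib
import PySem

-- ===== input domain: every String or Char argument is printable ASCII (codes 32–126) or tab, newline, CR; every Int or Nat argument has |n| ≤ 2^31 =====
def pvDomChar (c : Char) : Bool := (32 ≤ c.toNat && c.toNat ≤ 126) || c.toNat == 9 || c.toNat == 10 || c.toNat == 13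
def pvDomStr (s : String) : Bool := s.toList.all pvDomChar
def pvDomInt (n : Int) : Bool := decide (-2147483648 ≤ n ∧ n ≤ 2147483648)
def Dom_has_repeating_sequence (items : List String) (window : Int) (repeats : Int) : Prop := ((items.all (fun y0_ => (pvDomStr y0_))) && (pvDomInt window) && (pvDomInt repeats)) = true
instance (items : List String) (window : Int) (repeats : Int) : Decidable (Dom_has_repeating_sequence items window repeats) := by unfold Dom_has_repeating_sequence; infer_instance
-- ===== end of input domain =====

-- B: same guards, then builds the expected tail once (block * repeats) and compares with a
-- single list equality, instead of A's indexed loop of per-block slice comparisons.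

-- ===== PORT A =====
-- the 'for idx in range(2, repeats+1)' loop with its early 'return False'
def pvALoop (items block : List String) (window : Int) : List Int → Bool
  | [] => true
  | idx :: rest =>
      if PySem.List.slice items (some (-window * idx)) (some (-window * (idx - 1))) ≠ block then
        false
      else pvALoop items block window rest

def has_repeating_sequence (items : List String) (window : Int) (repeats : Int) : Bool :=
  if window ≤ 0 ∨ repeats ≤ 1 then false
  else
    let needed := window * repeats
    if (items.length : Int) < needed then false
    else
      let block := PySem.List.slice items (some (-window)) none
      pvALoop items block window (PySem.List.pyRange 2 (repeats + 1))

-- ===== PORT B =====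
def has_repeating_sequence_alt (items : List String) (window : Int) (repeats : Int) : Bool :=
  if window ≤ 0 ∨ repeats ≤ 1 then false
  else
    let needed := window * repeats
    if (items.length : Int) < needed then false
    else
      let block := PySem.List.slice items (some (-window)) none
      let tail := PySem.List.slice items (some (-needed)) none
      tail == (List.replicate repeats.toNat block).flatten

-- ===== PRECONDITION & SPEC =====
def Spec_has_repeating_sequence (items : List String) (window : Int) (repeats : Int) (out : Bool) : Prop := out = has_repeating_sequence_alt items window repeats
instance (items : List String) (window : Int) (repeats : Int) (out : Bool) : Decidable (Spec_has_repeating_sequence items window repeats out) := by unfold Spec_has_repeating_sequence; infer_instance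

-- ===== CLAIM (what is proved, stated in full; the proofs are below) =====
def Claim_equal_has_repeating_sequence : Prop := ∀ (items : List String) (window : Int) (repeats : Int), Dom_has_repeating_sequence items window repeats → Spec_has_repeating_sequence items window repeats (has_repeating_sequence items window repeats)

-- ===== LEMMAS AND PROOFS =====

theorem pvALoop_append (items block : List String) (w : Int) (xs ys : List Int) :
    pvALoop items block w (xs ++ ys) = (pvALoop items block w xs && pvALoop items block w ys) := by
  induction xs with
  | nil => simp [pvALoop]
  | cons x xs ih =>
      simp only [List.cons_append, pvALoop]
      split_ifs <;> simp [ih]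

theorem pvALoop_single (items block : List String) (w i : Int) :
    pvALoop items block w [i] =
      (PySem.List.slice items (some (-w * i)) (some (-w * (i - 1))) == block) := by
  simp only [pvALoop]
  split_ifs with h <;> simp_all

-- the slice A compares at index j (2 ≤ j) is the j-th block from the end
-- the slice A compares at index j (2 ≤ j) is the j-th block from the end
theorem pv_chunk_eq (items : List String) (w j : Nat) (hw : 0 < w) (hj : 2 ≤ j)
    (hn : w * j ≤ items.length) :
    PySem.List.slice items (some (-(w : Int) * (j : Int))) (some (-(w : Int) * ((j : Int) - 1)))
      = (items.drop (items.length - w * j)).take w := by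
  have h1 : -(w : Int) * (j : Int) = -((w * j : Nat) : Int) := by push_cast; ring
  have h2 : -(w : Int) * ((j : Int) - 1) = -((w * (j - 1) : Nat) : Int) := by
    have hc : ((j - 1 : Nat) : Int) = (j : Int) - 1 := by omega
    rw [← hc, Nat.cast_mul]; ring
  have hwj : 0 < w * j := by positivity
  have hwj1 : 0 < w * (j - 1) := by
    have : 0 < j - 1 := by omega
    positivity
  rw [h1, h2]
  simp only [PySem.List.slice]
  rw [PySem.List.clampIdx_neg_natCast items.length (w * j) hwj,
      PySem.List.clampIdx_neg_natCast items.length (w * (j - 1)) hwj1]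
  have harith : items.length - w * (j - 1) - (items.length - w * j) = w := by
    have : w * (j - 1) + w = w * j := by
      have hj1 : j - 1 + 1 = j := by omega
      calc w * (j - 1) + w = w * (j - 1 + 1) := by ring
        _ = w * j := by rw [hj1]
    omega
  rw [harith]

theorem pv_main (items : List String) (w : Nat) (hw : 0 < w) :
    ∀ r : Nat, 1 ≤ r → w * r ≤ items.length →
      pvALoop items (items.drop (items.length - w)) (w : Int) (PySem.List.pyRange 2 ((r : Int) + 1))
        = (items.drop (items.length - w * r) == (List.replicate r (items.drop (items.length - w))).flatten) := by
  intro r hr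
  induction r, hr using Nat.le_induction with
  | base =>
      intro hn
      have he : PySem.List.pyRange 2 (((1 : Nat) : Int) + 1) = ([] : List Int) := by
        rw [PySem.List.pyRange_one]; norm_num
      rw [he]
      simp [pvALoop]
  | succ r hr ih =>
      intro hn
      have hn' : w * r ≤ items.length := by
        have : w * r ≤ w * (r + 1) := by nlinarith
        omega
      have hcast : (((r + 1 : Nat) : Int) + 1) = ((r : Int) + 1) + 1 := by push_cast; ring
      have hsplit : PySem.List.pyRange 2 (((r + 1 : Nat) : Int) + 1)
          = PySem.List.pyRange 2 ((r : Int) + 1) ++ [(r : Int) + 1] := by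
        rw [hcast, PySem.List.pyRange_one_succ_right (by omega : (2:Int) ≤ (r : Int) + 1)]
      rw [hsplit, pvALoop_append, ih hn', pvALoop_single]
      have hjcast : ((r : Int) + 1) = (((r + 1 : Nat) : Nat) : Int) := by push_cast; ring
      have hchunk := pv_chunk_eq items w (r + 1) hw (by omega) hn
      rw [hjcast, hchunk]
      set n := items.length with hndef
      have hdecomp : items.drop (n - w * (r + 1))
          = (items.drop (n - w * (r + 1))).take w ++ items.drop (n - w * r) := by
        conv_lhs => rw [← List.take_append_drop w (items.drop (n - w * (r + 1)))]
        congr 1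
        rw [List.drop_drop]
        congr 1
        have : w * (r + 1) = w * r + w := by ring
        omega
      set c := (items.drop (n - w * (r + 1))).take w with hcdef
      set b := items.drop (n - w) with hbdef
      set t := items.drop (n - w * r) with htdef
      have hlenchunk : c.length = w := by
        rw [hcdef]
        simp only [List.length_take, List.length_drop]
        have : w * (r + 1) = w * r + w := by ring
        omega
      have hlenblock : b.length = w := by
        rw [hbdef]
        simp only [List.length_drop]
        have : w ≤ n := by nlinarith
        omega
      rw [List.replicate_succ, List.flatten_cons]
      rw [show items.drop (n - w * (r + 1)) = c ++ t from hdecomp]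
      rw [Bool.eq_iff_iff]
      simp only [Bool.and_eq_true, beq_iff_eq]
      constructor
      · rintro ⟨h1, h2⟩; rw [h1, h2]
      · intro h
        have := List.append_inj h (by rw [hlenchunk, hlenblock])
        exact ⟨this.2, this.1⟩

-- ===== VERDICT (by name: the statement is the Claim_ definition above) =====
theorem has_repeating_sequence_spec : Claim_equal_has_repeating_sequence := by
  intro items window repeats _
  unfold Spec_has_repeating_sequence has_repeating_sequence has_repeating_sequence_alt
  by_cases hg : window ≤ 0 ∨ repeats ≤ 1
  · simp [hg]
  · simp only [if_neg hg]
    rw [not_or] at hg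
    obtain ⟨hw, hr⟩ := hg
    by_cases hlen : (items.length : Int) < window * repeats
    · simp [hlen]
    · simp only [if_neg hlen]
      obtain ⟨w, rfl⟩ := Int.eq_ofNat_of_zero_le (by omega : (0:Int) ≤ window)
      obtain ⟨r, rfl⟩ := Int.eq_ofNat_of_zero_le (by omega : (0:Int) ≤ repeats)
      have hw' : 0 < w := by omega
      have hr' : 1 ≤ r := by omega
      have hn : w * r ≤ items.length := by exact_mod_cast Int.not_lt.mp hlen
      have hblock : PySem.List.slice items (some (-(w : Int))) none
          = items.drop (items.length - w) :=
        PySem.List.slice_from_neg_natCast items w hw'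
      have htail : PySem.List.slice items (some (-((w : Int) * (r : Int)))) none
          = items.drop (items.length - w * r) := by
        have h1 : -((w : Int) * (r : Int)) = -((w * r : Nat) : Int) := by push_cast; ring
        rw [h1]
        exact PySem.List.slice_from_neg_natCast items (w * r) (by positivity)
      simp only [hblock, htail, Int.toNat_natCast]
      exact pv_main items w hw' r hr' hn
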